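-- pv_equiv track=rewrite | github.com/Olaf0321/TextFromImage-windows | test5.py | extract_section_single_line
-- ===== SOURCE A (Python) =====
-- def extract_section_single_line(text, start_keyword, end_keyword, remove_phrase, exclude_prefixes):
--     lines = text.splitlines()
--     start_index = end_index = -1
--
--     for i, line in enumerate(lines):
--         if start_keyword in line and start_index == -1:
--             start_index = i
--         if end_keyword in line and start_index != -1:
--             end_index = i
--             break
--
--     if start_index != -1 and end_index != -1:
--         section = lines[start_index + 1:end_index]
--         filtered_lines = []
--         for line in section:
--             stripped = line.strip()
--             if not any(stripped.startswith(prefix) for prefix in exclude_prefixes):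
--                 filtered_lines.append(stripped)
--         one_line = ' '.join(filtered_lines)
--
--         # Step 3: Remove specific phrase
--         cleaned = one_line.replace(remove_phrase, '')
--         return cleaned
--     else:
--         return 'Section not found.'
-- ===== SOURCE B (Python) =====
-- def extract_section_single_line(text, start_keyword, end_keyword, remove_phrase, exclude_prefixes):
--     collected = []
--     started = found = False
--     for line in text.splitlines():
--         if not started:
--             if start_keyword in line:
--                 started = True
--                 if end_keyword in line:
--                     found = True
--                     break
--         elif end_keyword in line:
--             found = True
--             break
--         else:
--             stripped = line.strip()
--             if not any(stripped.startswith(p) for p in exclude_prefixes):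
--                 collected.append(stripped)
--     if found:
--         return ' '.join(collected).replace(remove_phrase, '')
--     return 'Section not found.'
-- ===== Notes on version B (the rewrite author's own statement) =====
-- stated objective: alternative
-- what changed: A makes two phases (an enumerate loop that finds start/end indices, then a slice plus a second filtering loop); B is a single state-machine pass over the lines that collects stripped, non-excluded lines as it scans and breaks at the end keyword.
import Mathlib
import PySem

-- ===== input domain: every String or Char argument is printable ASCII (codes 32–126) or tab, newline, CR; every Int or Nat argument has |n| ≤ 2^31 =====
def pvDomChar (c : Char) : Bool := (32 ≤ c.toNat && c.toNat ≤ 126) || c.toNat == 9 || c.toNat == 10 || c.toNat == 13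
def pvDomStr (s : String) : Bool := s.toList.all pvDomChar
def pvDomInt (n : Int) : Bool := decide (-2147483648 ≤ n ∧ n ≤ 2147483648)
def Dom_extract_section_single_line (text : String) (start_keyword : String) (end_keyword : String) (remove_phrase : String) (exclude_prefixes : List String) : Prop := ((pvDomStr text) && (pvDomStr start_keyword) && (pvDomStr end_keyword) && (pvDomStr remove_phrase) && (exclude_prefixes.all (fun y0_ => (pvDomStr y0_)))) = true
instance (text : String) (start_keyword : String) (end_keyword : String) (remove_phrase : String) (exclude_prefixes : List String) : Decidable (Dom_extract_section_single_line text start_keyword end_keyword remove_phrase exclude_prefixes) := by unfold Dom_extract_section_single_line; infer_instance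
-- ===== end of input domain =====

-- B replaces A's two-phase design (index-finding loop over enumerate, then a slice and a second
-- filtering loop) with a single state-machine pass over the lines that collects as it scans and
-- breaks at the end keyword; objective: alternative decomposition (same asymptotic cost).

-- ===== PORT A =====
-- A's index-finding loop: state start_index; breaks (returning end_index = i) when end_keyword hits
def pvAFind (start_keyword end_keyword : String) : List (Int × String) → Int → Int × Int
  | [], si => (si, -1)
  | (i, line) :: rest, si =>
    let si' := if PySem.Str.isIn start_keyword line && (si == -1) then i else si
    if PySem.Str.isIn end_keyword line && !(si' == -1) then (si', i)
    else pvAFind start_keyword end_keyword rest si'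

def extract_section_single_line (text : String) (start_keyword : String) (end_keyword : String) (remove_phrase : String) (exclude_prefixes : List String) : String :=
  let lines := PySem.Str.splitlines text
  let se := pvAFind start_keyword end_keyword (PySem.List.enumerate lines) (-1)
  if !(se.1 == -1) && !(se.2 == -1) then
    let sect := PySem.List.slice lines (some (se.1 + 1)) (some se.2)
    let filtered_lines := sect.foldl (fun acc line =>
      let stripped := PySem.Str.strip line
      if !(exclude_prefixes.any fun prefix_ => PySem.Str.startswith stripped prefix_) then
        acc ++ [stripped]
      else acc) []
    PySem.Str.replace (PySem.Str.join " " filtered_lines) remove_phrase ""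
  else "Section not found."

-- ===== PORT B =====
-- B's single pass: not-started / started states; `some collected` = break with found = True,
-- `none` = the loop ended without finding the section
def pvBLoop (start_keyword end_keyword : String) (exclude_prefixes : List String) :
    List String → Bool → List String → Option (List String)
  | [], _, _ => none
  | line :: rest, started, collected =>
    if !started then
      if PySem.Str.isIn start_keyword line then
        if PySem.Str.isIn end_keyword line then some collected
        else pvBLoop start_keyword end_keyword exclude_prefixes rest true collected
      else pvBLoop start_keyword end_keyword exclude_prefixes rest false collected
    else if PySem.Str.isIn end_keyword line then some collected
    else
      let stripped := PySem.Str.strip line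
      if !(exclude_prefixes.any fun p => PySem.Str.startswith stripped p) then
        pvBLoop start_keyword end_keyword exclude_prefixes rest started (collected ++ [stripped])
      else pvBLoop start_keyword end_keyword exclude_prefixes rest started collected

def extract_section_single_line_alt (text : String) (start_keyword : String) (end_keyword : String) (remove_phrase : String) (exclude_prefixes : List String) : String :=
  match pvBLoop start_keyword end_keyword exclude_prefixes (PySem.Str.splitlines text) false [] with
  | some collected => PySem.Str.replace (PySem.Str.join " " collected) remove_phrase ""
  | none => "Section not found."

-- ===== PRECONDITION & SPEC =====
def Spec_extract_section_single_line (text : String) (start_keyword : String) (end_keyword : String) (remove_phrase : String) (exclude_prefixes : List String) (out : String) : Prop := out = extract_section_single_line_alt text start_keyword end_keyword remove_phrase exclude_prefixes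
instance (text : String) (start_keyword : String) (end_keyword : String) (remove_phrase : String) (exclude_prefixes : List String) (out : String) : Decidable (Spec_extract_section_single_line text start_keyword end_keyword remove_phrase exclude_prefixes out) := by unfold Spec_extract_section_single_line; infer_instance

-- ===== CLAIM (what is proved, stated in full; the proofs are below) =====
def Claim_equal_extract_section_single_line : Prop := ∀ (text : String) (start_keyword : String) (end_keyword : String) (remove_phrase : String) (exclude_prefixes : List String), Dom_extract_section_single_line text start_keyword end_keyword remove_phrase exclude_prefixes → Spec_extract_section_single_line text start_keyword end_keyword remove_phrase exclude_prefixes (extract_section_single_line text start_keyword end_keyword remove_phrase exclude_prefixes)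

-- ===== LEMMAS AND PROOFS =====

-- the strip-then-exclude keep-test shared by both programs
def pvKeep (exclude_prefixes : List String) (line : String) : Bool :=
  !(exclude_prefixes.any fun p => PySem.Str.startswith (PySem.Str.strip line) p)

-- A's loop once the start index is fixed: it scans for the first end_keyword line
theorem pvAFind_started (sk ek : String) (ls : List String) (k si : Int) (hsi : si ≠ -1) :
    pvAFind sk ek (PySem.List.enumerate ls k) si =
      (si, match ls.findIdx? (fun l => PySem.Str.isIn ek l) with
           | none => -1
           | some e => k + e) := by
  induction ls generalizing k with
  | nil => simp [PySem.List.enumerate, pvAFind]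
  | cons l ls ih =>
    have h1 : PySem.List.enumerate (l :: ls) k = (k, l) :: PySem.List.enumerate ls (k+1) := rfl
    have hne : (si == -1) = false := by simp [hsi]
    rw [h1]
    simp only [pvAFind, hne, Bool.and_false, Bool.not_false, Bool.and_true, if_neg (Bool.false_ne_true), List.findIdx?_cons]
    by_cases hq : PySem.Str.isIn ek l = true
    · rw [if_pos hq, if_pos hq]; simp
    · rw [if_neg hq, if_neg hq, ih (k+1)]
      cases h : ls.findIdx? (fun l => PySem.Str.isIn ek l) with
      | none => simp
      | some e => simp; push_cast; ring

-- A's full index-finding loop from the initial state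
theorem pvAFind_spec (sk ek : String) (ls : List String) (k : Int) (hk : 0 ≤ k) :
    pvAFind sk ek (PySem.List.enumerate ls k) (-1) =
      (match ls.findIdx? (fun l => PySem.Str.isIn sk l) with
       | none => (-1, -1)
       | some s => (k + s,
           match (ls.drop s).findIdx? (fun l => PySem.Str.isIn ek l) with
           | none => -1
           | some e => k + s + e)) := by
  induction ls generalizing k with
  | nil => simp [PySem.List.enumerate, pvAFind]
  | cons l ls ih =>
    have h1 : PySem.List.enumerate (l :: ls) k = (k, l) :: PySem.List.enumerate ls (k+1) := rfl
    have hk' : k ≠ -1 := by omega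
    have hkne : (k == -1) = false := by simp [hk']
    rw [h1]
    simp only [pvAFind, List.findIdx?_cons, beq_self_eq_true, Bool.and_true]
    by_cases hp : PySem.Str.isIn sk l = true
    · rw [if_pos hp, if_pos hp]
      simp only [hkne, Bool.not_false, Bool.and_true]
      by_cases hq : PySem.Str.isIn ek l = true
      · rw [if_pos hq]
        simp only [List.drop_zero, List.findIdx?_cons, if_pos hq]
        simp
      · rw [if_neg hq, pvAFind_started sk ek ls (k+1) k hk']
        simp only [List.drop_zero, List.findIdx?_cons, if_neg hq]
        cases h : ls.findIdx? (fun l => PySem.Str.isIn ek l) with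
        | none => simp
        | some e => simp; push_cast; ring
    · rw [if_neg hp, if_neg hp]
      simp only [beq_self_eq_true, Bool.not_true, Bool.and_false, if_neg (Bool.false_ne_true)]
      rw [ih (k+1) (by omega)]
      cases h : ls.findIdx? (fun l => PySem.Str.isIn sk l) with
      | none => simp
      | some s =>
        simp only [Option.map_some, List.drop_succ_cons]
        cases h2 : (ls.drop s).findIdx? (fun l => PySem.Str.isIn ek l) with
        | none => simp; ring
        | some e => simp; omega

-- B's loop in the started state
theorem pvBLoop_started (sk ek : String) (ex : List String) (ls : List String) (c : List String) :
    pvBLoop sk ek ex ls true c =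
      match ls.findIdx? (fun l => PySem.Str.isIn ek l) with
      | none => none
      | some e => some (c ++ ((ls.take e).filter (pvKeep ex)).map PySem.Str.strip) := by
  induction ls generalizing c with
  | nil => simp [pvBLoop]
  | cons l ls ih =>
    simp only [pvBLoop, Bool.not_true, if_neg (Bool.false_ne_true), List.findIdx?_cons]
    by_cases hq : PySem.Str.isIn ek l = true
    · rw [if_pos hq, if_pos hq]; simp
    · rw [if_neg hq, if_neg hq]
      by_cases hkp : pvKeep ex l = true
      · rw [if_pos (by simpa [pvKeep] using hkp), ih]
        cases h : ls.findIdx? (fun l => PySem.Str.isIn ek l) with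
        | none => simp
        | some e => simp [List.filter_cons, hkp]
      · rw [if_neg (by simpa [pvKeep] using hkp), ih]
        cases h : ls.findIdx? (fun l => PySem.Str.isIn ek l) with
        | none => simp
        | some e =>
          simp [List.filter_cons, hkp]

-- B's loop from the initial state
theorem pvBLoop_spec (sk ek : String) (ex : List String) (ls : List String) :
    pvBLoop sk ek ex ls false [] =
      match ls.findIdx? (fun l => PySem.Str.isIn sk l) with
      | none => none
      | some s =>
        match (ls.drop s).findIdx? (fun l => PySem.Str.isIn ek l) with
        | none => none
        | some e => some (((((ls.drop s).take e).drop 1).filter (pvKeep ex)).map PySem.Str.strip) := by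
  induction ls with
  | nil => simp [pvBLoop]
  | cons l ls ih =>
    simp only [pvBLoop, Bool.not_false, if_pos rfl, List.findIdx?_cons]
    by_cases hp : PySem.Str.isIn sk l = true
    · rw [if_pos hp, if_pos hp]
      simp only [List.drop_zero, List.findIdx?_cons]
      by_cases hq : PySem.Str.isIn ek l = true
      · have hq' : PySem.Chars.isIn ek.toList l.toList = true := by
          simpa [PySem.Str.isIn] using hq
        rw [if_pos hq, if_pos hq]; simp [hq']
      · rw [if_neg hq, if_neg hq, pvBLoop_started]
        have hq' : PySem.Chars.isIn ek.toList l.toList = false := by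
          simpa [PySem.Str.isIn] using hq
        cases h : ls.findIdx? (fun l => PySem.Str.isIn ek l) with
        | none => simp [hq']
        | some e => simp [hq']
    · rw [if_neg hp, if_neg hp, ih]
      cases h : ls.findIdx? (fun l => PySem.Str.isIn sk l) with
      | none => simp
      | some s => simp

-- ===== VERDICT (by name: the statement is the Claim_ definition above) =====
theorem extract_section_single_line_spec : Claim_equal_extract_section_single_line := by
  unfold Claim_equal_extract_section_single_line
  intro text sk ek rp ex _
  unfold Spec_extract_section_single_line

  show (let lines := PySem.Str.splitlines text
        let se := pvAFind sk ek (PySem.List.enumerate lines) (-1)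
        if !(se.1 == -1) && !(se.2 == -1) then
          let sect := PySem.List.slice lines (some (se.1 + 1)) (some se.2)
          let filtered_lines := sect.foldl (fun acc line =>
            let stripped := PySem.Str.strip line
            if !(ex.any fun prefix_ => PySem.Str.startswith stripped prefix_) then
              acc ++ [stripped]
            else acc) []
          PySem.Str.replace (PySem.Str.join " " filtered_lines) rp ""
        else "Section not found.") = _
  simp only []
  unfold extract_section_single_line_alt
  rw [show PySem.List.enumerate (PySem.Str.splitlines text) = PySem.List.enumerate (PySem.Str.splitlines text) 0 from rfl]
  rw [pvAFind_spec sk ek (PySem.Str.splitlines text) 0 le_rfl, pvBLoop_spec sk ek ex (PySem.Str.splitlines text)]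
  set lines := PySem.Str.splitlines text with hlines
  cases hs : lines.findIdx? (fun l => PySem.Str.isIn sk l) with
  | none =>
    have hsC : List.findIdx? (fun l => PySem.Chars.isIn sk.toList l.toList) lines = none := by
      simpa using hs
    simp [hs, hsC]
  | some s =>
    have hsC : List.findIdx? (fun l => PySem.Chars.isIn sk.toList l.toList) lines = some s := by
      simpa using hs
    cases he : (lines.drop s).findIdx? (fun l => PySem.Str.isIn ek l) with
    | none =>
      have heC : List.findIdx? (fun l => PySem.Chars.isIn ek.toList l.toList) (List.drop s lines) = none := by
        simpa using he
      simp [hs, hsC, he, heC]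
    | some e =>
      have heC : List.findIdx? (fun l => PySem.Chars.isIn ek.toList l.toList) (List.drop s lines) = some e := by
        simpa using he
      simp only [hs, hsC, he, heC, zero_add]
      have hguard : (!((s : Int) == -1) && !(((s : Int) + e) == -1)) = true := by
        simp only [Bool.and_eq_true, Bool.not_eq_eq_eq_not, Bool.not_true, beq_eq_false_iff_ne]
        omega
      rw [if_pos hguard]
      have hslice : PySem.List.slice lines (some ((s : Int) + 1)) (some ((s : Int) + e))
          = (((lines.drop s).take e).drop 1) := by
        rw [show ((s:Int)+1) = ((s+1 : Nat) : Int) by push_cast; ring,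
            show ((s:Int)+(e:Int)) = ((s+e : Nat) : Int) by push_cast; ring]
        rw [PySem.List.slice_natCast]
        rw [List.drop_take, ← List.drop_drop]
        congr 1
        omega
      rw [hslice]
      rw [show (fun (acc : List String) (line : String) =>
            let stripped := PySem.Str.strip line;
            if (!(ex.any fun prefix_ => PySem.Str.startswith stripped prefix_)) = true then
              acc ++ [stripped] else acc)
          = (fun acc line => if pvKeep ex line = true then acc ++ [PySem.Str.strip line] else acc)
          from rfl]
      rw [PySem.List.foldl_append_if (pvKeep ex) PySem.Str.strip]
      simp
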